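-- pv_equiv track=rewrite | github.com/juvelop17/problem_solving | python/PStest/200929_11st/1.py | solution
-- ===== SOURCE A (Python) =====
-- def solution(S):
--     answer = -1
--
--     total_cnt = 0
--     acnt = 0
--     if len(S) == 1:
--         if S == 'a':
--             return 1
--         else:
--             return 4
--
--     if S[0] != 'a':
--         total_cnt += 2
--     for i in range(len(S)-1):
--         if S[i] == 'a' and S[i+1] == 'a':
--             acnt += 1
--             if acnt == 2:
--                 return -1
--         elif S[i] == 'a':
--             if acnt == 0:
--                 total_cnt += 1
--             acnt = 0
--         elif S[i+1] == 'a':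
--             pass
--         else:
--             total_cnt += 2
--     if S[-2] != 'a' and S[-1] == 'a':
--         total_cnt += 1
--     elif S[-1] != 'a':
--         total_cnt += 2
--
--     answer = total_cnt
--
--     return answer
-- ===== SOURCE B (Python) =====
-- def solution(S):
--     if len(S) == 1:
--         return 1 if S == 'a' else 4
--     if any(x == 'a' and y == 'a' and z == 'a' for x, y, z in zip(S, S[1:], S[2:])):
--         return -1
--     total = 2 * (S[0] != 'a')
--     total += 2 * sum(1 for x, y in zip(S, S[1:]) if x != 'a' and y != 'a')
--     total += 2 * (S[-1] != 'a')
--     total += sum(1 for x, y, z in zip('b' + S, S, S[1:] + 'b') if y == 'a' and x != 'a' and z != 'a')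
--     return total
-- ===== Notes on version B (the rewrite author's own statement) =====
-- stated objective: alternative
-- what changed: Replaces A's single stateful pass over adjacent index pairs (mutable acnt/total with early return) by a declarative formulation: a zip-based adjacent-triple test for the -1 case, then the score as a sum of independent zip-comprehension counts (pairs of non-target letters, isolated single-letter runs with padded neighbours) plus endpoint terms; Pre_ excludes only the empty string, on which both A and B raise IndexError.
import Mathlib
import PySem

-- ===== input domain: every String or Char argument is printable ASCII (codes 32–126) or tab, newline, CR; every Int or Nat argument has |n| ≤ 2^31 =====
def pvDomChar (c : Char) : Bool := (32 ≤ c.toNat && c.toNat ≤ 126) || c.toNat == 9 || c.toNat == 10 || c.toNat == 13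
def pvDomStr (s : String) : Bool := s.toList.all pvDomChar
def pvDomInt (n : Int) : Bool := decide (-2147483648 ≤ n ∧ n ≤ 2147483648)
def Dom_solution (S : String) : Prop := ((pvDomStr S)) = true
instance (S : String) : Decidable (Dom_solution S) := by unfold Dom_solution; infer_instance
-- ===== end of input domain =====

-- B restates A's stateful index-pair scan as a zip-based adjacent-triple test plus independent zip-comprehension counts; alternative decomposition, same O(n) cost; A raises IndexError on "" (excluded by Pre_solution).

-- ===== PORT A =====
-- the for-loop over i in range(len(S)-1): state (total, acnt); the early 'return -1' is encoded as none
def aLoop : List Char → Int → Int → Option Int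
  | x :: y :: rest, total, acnt =>
    if x = 'a' ∧ y = 'a' then
      (if acnt + 1 = 2 then none
       else aLoop (y :: rest) total (acnt + 1))
    else if x = 'a' then
      aLoop (y :: rest) (if acnt = 0 then total + 1 else total) 0
    else if y = 'a' then
      aLoop (y :: rest) total acnt
    else
      aLoop (y :: rest) (total + 2) acnt
  | _, total, _ => some total

def solution (S : String) : Int :=
  let cs := S.toList
  if cs.length = 1 then (if S = "a" then 1 else 4)
  else
    match cs with
    | [] => 0
    | c0 :: _ =>
      let total0 : Int := if c0 ≠ 'a' then 2 else 0
      match aLoop cs total0 0 with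
      | none => -1
      | some t =>
        let l := cs.getLastD 'a'
        let sl := cs.dropLast.getLastD 'a'
        if sl ≠ 'a' ∧ l = 'a' then t + 1
        else if l ≠ 'a' then t + 2
        else t

-- ===== PORT B =====
def solution_alt (S : String) : Int :=
  let cs := S.toList
  if cs.length = 1 then (if S = "a" then 1 else 4)
  else if (cs.zip ((cs.drop 1).zip (cs.drop 2))).any
            (fun t => t.1 == 'a' && t.2.1 == 'a' && t.2.2 == 'a') then -1
  else
    match cs with
    | [] => 0
    | c0 :: _ =>
      let total0 : Int := if c0 ≠ 'a' then 2 else 0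
      let t1 : Int := 2 * (((cs.zip (cs.drop 1)).countP (fun t => t.1 != 'a' && t.2 != 'a') : Nat) : Int)
      let t2 : Int := if cs.getLastD 'a' ≠ 'a' then 2 else 0
      let t3 : Int := ((((('b' :: cs).zip (cs.zip ((cs.drop 1) ++ ['b']))).countP
            (fun t => t.2.1 == 'a' && t.1 != 'a' && t.2.2 != 'a')) : Nat) : Int)
      total0 + t1 + t2 + t3

-- ===== PRECONDITION & SPEC =====
-- Pre_ excludes only the empty string, on which Python A raises IndexError at S[0] (B raises there too).
def Pre_solution (S : String) : Prop := S ≠ ""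
instance (S : String) : Decidable (Pre_solution S) := by unfold Pre_solution; infer_instance
def pvWitness_solution : String := "ab"

def Spec_solution (S : String) (out : Int) : Prop := out = solution_alt S
instance (S : String) (out : Int) : Decidable (Spec_solution S out) := by unfold Spec_solution; infer_instance

-- ===== CLAIM (what is proved, stated in full; the proofs are below) =====
def Claim_equal_solution : Prop := ∀ (S : String), Dom_solution S → Pre_solution S → Spec_solution S (solution S)

-- ===== LEMMAS AND PROOFS =====

-- spec functions (proof-only): per-pair recursions over the character list

def nnC : List Char → Int
  | x :: y :: r => (if x ≠ 'a' ∧ y ≠ 'a' then 2 else 0) + nnC (y :: r)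
  | _ => 0

def isoC : Char → List Char → Int
  | p, x :: y :: r => (if x = 'a' ∧ y ≠ 'a' ∧ p ≠ 'a' then 1 else 0) + isoC x (y :: r)
  | _, _ => 0

def aaaC : Char → List Char → Bool
  | p, x :: y :: r => (p == 'a' && x == 'a' && y == 'a') || aaaC x (y :: r)
  | _, _ => false

def lastC : Char → List Char → Int
  | p, [x] => if x = 'a' ∧ p ≠ 'a' then 1 else 0
  | _, x :: y :: r => lastC x (y :: r)
  | _, [] => 0

theorem aLoop_eq : ∀ (ys : List Char) (x p : Char) (total : Int),
    aLoop (x :: ys) total (if p = 'a' ∧ x = 'a' then 1 else 0) =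
      if aaaC p (x :: ys) then none
      else some (total + nnC (x :: ys) + isoC p (x :: ys)) := by
  intro ys
  induction ys with
  | nil => intro x p total; simp [aLoop, aaaC, nnC, isoC]
  | cons y r ih =>
    intro x p total
    by_cases hx : x = 'a' <;> by_cases hy : y = 'a' <;> by_cases hp : p = 'a' <;>
      simp only [aLoop, aaaC, nnC, isoC, hx, hy, hp, if_true, if_false, and_true, and_false,
        true_and, false_and, and_self, not_true_eq_false, not_false_eq_true, ite_true, ite_false,
        beq_self_eq_true, Bool.true_and, Bool.and_self, Bool.true_or, Bool.false_or,
        Bool.and_true, Bool.and_false, Bool.or_false]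
    -- goal order: (hx,hy,hp) = TTT,TTF,TFT,TFF,FTT,FTF,FFT,FFF
    · norm_num
    · have h := ih 'a' 'a' total; simp only [and_self, if_true] at h
      norm_num [h, hp]
      try (split_ifs <;> simp <;> ring)
    · have h := ih y 'a' total; simp only [hy, and_false, if_false] at h
      norm_num [h, hy]
      try (split_ifs <;> simp <;> ring)
    · have h := ih y 'a' (total + 1); simp only [hy, and_false, if_false] at h
      norm_num [h, hy, hp]
      try (split_ifs <;> simp <;> ring)
    · have h := ih 'a' x total; simp only [hx, false_and, if_false] at h
      norm_num [h, hx]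
      try (split_ifs <;> simp <;> ring)
    · have h := ih 'a' x total; simp only [hx, false_and, if_false] at h
      norm_num [h, hx]
      try (split_ifs <;> simp <;> ring)
    · have h := ih y x (total + 2); simp only [hy, and_false, if_false] at h
      norm_num [h, hx, hy]
      try (split_ifs <;> simp <;> ring)
    · have h := ih y x (total + 2); simp only [hy, and_false, if_false] at h
      norm_num [h, hx, hy, hp]
      try (split_ifs <;> simp <;> ring)

theorem aaa_zip : ∀ (cs : List Char) (p : Char),
    aaaC p cs = ((p :: cs).zip (cs.zip (cs.drop 1))).any
        (fun t => t.1 == 'a' && t.2.1 == 'a' && t.2.2 == 'a') := by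
  intro cs
  induction cs with
  | nil => intro p; simp [aaaC]
  | cons x cs ih =>
    intro p
    cases cs with
    | nil => simp [aaaC]
    | cons y r => simp [aaaC, ih x, List.any_cons]

theorem nn_zip : ∀ (cs : List Char),
    nnC cs = 2 * (((cs.zip (cs.drop 1)).countP (fun t => t.1 != 'a' && t.2 != 'a') : Nat) : Int) := by
  intro cs
  induction cs with
  | nil => simp [nnC]
  | cons x cs ih =>
    cases cs with
    | nil => simp [nnC]
    | cons y r =>
      simp only [nnC, List.drop, List.zip_cons_cons, List.countP_cons] at *
      rw [ih]
      split_ifs with h <;> simp_all <;> push_cast <;> ring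

theorem iso_zip : ∀ (cs : List Char) (p : Char), cs ≠ [] →
    (((((p :: cs).zip (cs.zip ((cs.drop 1) ++ ['b']))).countP
        (fun t => t.2.1 == 'a' && t.1 != 'a' && t.2.2 != 'a')) : Nat) : Int)
      = isoC p cs + lastC p cs := by
  intro cs
  induction cs with
  | nil => intro p h; exact absurd rfl h
  | cons x cs ih =>
    intro p _
    cases cs with
    | nil => simp [isoC, lastC, List.countP_cons]
    | cons y r =>
      simp only [List.drop, List.cons_append, List.zip_cons_cons, List.countP_cons]
      have h2 := ih x (by simp)
      simp only [List.drop] at h2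
      push_cast
      rw [h2]
      show _ = isoC p (x :: y :: r) + lastC p (x :: y :: r)
      simp only [isoC, lastC]
      split_ifs <;> simp_all <;> ring

theorem lastC_eq : ∀ (r : List Char) (y x p : Char),
    lastC p (x :: y :: r) =
      if ((x :: y :: r).getLastD 'a' = 'a' ∧ (x :: y :: r).dropLast.getLastD 'a' ≠ 'a') then 1 else 0 := by
  intro r
  induction r with
  | nil => intro y x p; simp [lastC]
  | cons z r' ih =>
    intro y x p
    show lastC x (y :: z :: r') = _
    rw [ih z y x]
    congr 1

-- ===== VERDICT (by name: the statement is the Claim_ definition above) =====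
theorem solution_spec : Claim_equal_solution := by
  intro S hDom hPre
  show solution S = solution_alt S
  match h : S.toList with
  | [] =>
    exact absurd (String.toList_eq_nil_iff.mp h) hPre
  | [c] => simp [solution, solution_alt, h]
  | c0 :: c1 :: rest =>
    simp only [solution, solution_alt, h, List.length_cons,
      eq_false (by omega : ¬ (rest.length + 1 + 1 = 1)), if_false]
    have hA := aLoop_eq (c1 :: rest) c0 'b' (if c0 ≠ 'a' then 2 else 0)
    simp only [show ((('b':Char) = 'a') ∧ c0 = 'a') = False from by simp, if_false] at hA
    rw [hA, aaa_zip (c0 :: c1 :: rest) 'b']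
    have hany : ((('b' :: c0 :: c1 :: rest).zip ((c0 :: c1 :: rest).zip ((c0 :: c1 :: rest).drop 1))).any
        (fun t => t.1 == 'a' && t.2.1 == 'a' && t.2.2 == 'a'))
        = (((c0 :: c1 :: rest).zip (((c0 :: c1 :: rest).drop 1).zip ((c0 :: c1 :: rest).drop 2))).any
        (fun t => t.1 == 'a' && t.2.1 == 'a' && t.2.2 == 'a')) := by
      simp [List.any_cons]
    rw [hany]
    by_cases hq : (((c0 :: c1 :: rest).zip (((c0 :: c1 :: rest).drop 1).zip ((c0 :: c1 :: rest).drop 2))).any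
        (fun t => t.1 == 'a' && t.2.1 == 'a' && t.2.2 == 'a')) = true
    · simp only [hq, if_true]
    · simp only [hq, if_false]
      rw [← nn_zip (c0 :: c1 :: rest), iso_zip (c0 :: c1 :: rest) 'b' (by simp),
        lastC_eq rest c1 c0 'b']
      split_ifs <;> simp_all <;> ring
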